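-- pv_equiv track=rewrite | github.com/DevilDublin/Dev-Projects | email-summariser-action-extractor/app.py | find_trigger
-- ===== SOURCE A (Python) =====
-- REQUEST_TRIGGERS = [
--     "could you", "can you", "please can you", "please could you",
--     "we need to", "we need you to", "i need you to", "i need to",
--     "if possible could you", "if possible can you",
-- ]
--
-- def find_trigger(lower: str):
--     best_idx = None
--     best_trig = None
--     for trig in REQUEST_TRIGGERS:
--         idx = lower.find(trig)
--         if idx == -1:
--             continue
--         if idx > 60:
--             continue
--         if best_idx is None or idx < best_idx:
--             best_idx = idx
--             best_trig = trig
--     return best_idx, best_trig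
-- ===== SOURCE B (Python) =====
-- REQUEST_TRIGGERS = [
--     "could you", "can you", "please can you", "please could you",
--     "we need to", "we need you to", "i need you to", "i need to",
--     "if possible could you", "if possible can you",
-- ]
--
-- def find_trigger(lower: str):
--     n = min(len(lower), 60)
--     pos = 0
--     while pos <= n:
--         for trig in REQUEST_TRIGGERS:
--             if lower.startswith(trig, pos):
--                 return pos, trig
--         pos += 1
--     return None, None
-- ===== Notes on version B (the rewrite author's own statement) =====
-- stated objective: faster
-- what changed: B replaces A's per-trigger whole-string .find scans with a left-to-right scan of positions 0..min(len,60) that tests the triggers in list order with startswith and returns at the first hit, so work is bounded by 61 positions regardless of string length.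
import Mathlib
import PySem

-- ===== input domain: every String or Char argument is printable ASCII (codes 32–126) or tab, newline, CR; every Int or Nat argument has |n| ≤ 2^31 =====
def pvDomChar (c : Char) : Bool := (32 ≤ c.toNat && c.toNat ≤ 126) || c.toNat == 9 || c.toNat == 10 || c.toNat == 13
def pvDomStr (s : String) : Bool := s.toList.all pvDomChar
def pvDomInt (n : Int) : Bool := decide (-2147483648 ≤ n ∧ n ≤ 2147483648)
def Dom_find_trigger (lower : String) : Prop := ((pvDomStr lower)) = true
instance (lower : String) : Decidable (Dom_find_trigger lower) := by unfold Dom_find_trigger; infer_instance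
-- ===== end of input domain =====

-- B scans positions 0..min(len,60) and tests triggers in order at each position, instead of A's
-- per-trigger whole-string .find scans; same value everywhere, work bounded by 61 positions.

-- ===== PORT A =====
def pvTriggers : List String :=
  ["could you", "can you", "please can you", "please could you",
   "we need to", "we need you to", "i need you to", "i need to",
   "if possible could you", "if possible can you"]

-- loop body of A: idx = lower.find(trig); the two 'continue's; update when best is None or idx < best
def pvStepA (lower : String) (acc : Option Int × Option String) (trig : String) :
    Option Int × Option String :=
  let idx := PySem.Str.find lower trig
  if idx = -1 then acc
  else if 60 < idx then acc
  else
    match acc.1 with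
    | none => (some idx, some trig)
    | some b => if idx < b then (some idx, some trig) else acc

def find_trigger (lower : String) : Option Int × Option String :=
  pvTriggers.foldl (pvStepA lower) (none, none)

-- ===== PORT B =====
-- the while-loop of Source B: at each pos the inner 'for trig … if lower.startswith(trig, pos): return'
-- is the first trigger (list order) matching at pos; lower.startswith(trig, pos) for 0 <= pos is
-- exactly PySem.Chars.startswith ((toList lower).drop pos) trig.toList
def pvScan (cs : List Char) (n : Nat) (pos : Nat) : Option Int × Option String :=
  if _h : pos ≤ n then
    match pvTriggers.find? (fun trig => PySem.Chars.startswith (cs.drop pos) trig.toList) with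
    | some trig => (some (pos : Int), some trig)
    | none => pvScan cs n (pos + 1)
  else (none, none)
termination_by n + 1 - pos
decreasing_by omega

def find_trigger_alt (lower : String) : Option Int × Option String :=
  pvScan lower.toList (min lower.toList.length 60) 0

-- ===== PRECONDITION & SPEC =====
def Spec_find_trigger (lower : String) (out : Option Int × Option String) : Prop := out = find_trigger_alt lower
instance (lower : String) (out : Option Int × Option String) : Decidable (Spec_find_trigger lower out) := by unfold Spec_find_trigger; infer_instance

-- ===== CLAIM (what is proved, stated in full; the proofs are below) =====
def Claim_equal_find_trigger : Prop := ∀ (lower : String), Dom_find_trigger lower → Spec_find_trigger lower (find_trigger lower)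


-- ===== LEMMAS AND PROOFS =====

-- proof-side abbreviation: A's idx for a trigger
def pvM (lower t : String) : Int := PySem.Str.find lower t

-- minimum of the valid (found, <= 60) trigger indices, in A's traversal order
def pvMv (lower : String) : List String → Option Int
  | [] => none
  | t :: ts =>
    if 0 ≤ pvM lower t ∧ pvM lower t ≤ 60 then
      some (match pvMv lower ts with | none => pvM lower t | some M => min (pvM lower t) M)
    else pvMv lower ts

lemma pv_stepA_invalid (lower t : String) (acc : Option Int × Option String)
    (h : pvM lower t = -1 ∨ 60 < pvM lower t) : pvStepA lower acc t = acc := by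
  rcases h with h | h
  · simp [pvStepA, pvM] at h ⊢; simp [h]
  · simp only [pvM] at h
    simp only [pvStepA]
    rw [if_neg (by omega), if_pos h]

lemma pv_stepA_valid_none (lower t : String) (o : Option String)
    (h0 : 0 ≤ pvM lower t) (h60 : pvM lower t ≤ 60) :
    pvStepA lower (none, o) t = (some (pvM lower t), some t) := by
  simp only [pvM] at h0 h60 ⊢
  simp only [pvStepA]
  rw [if_neg (by omega), if_neg (by omega)]

lemma pv_stepA_valid_some (lower t : String) (b : Int) (o : Option String)
    (h0 : 0 ≤ pvM lower t) (h60 : pvM lower t ≤ 60) :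
    pvStepA lower (some b, o) t =
      if pvM lower t < b then (some (pvM lower t), some t) else (some b, o) := by
  simp only [pvM] at h0 h60 ⊢
  simp only [pvStepA]
  rw [if_neg (by omega), if_neg (by omega)]

lemma pv_mv_none (lower : String) (ts : List String) (h : pvMv lower ts = none) :
    ∀ t ∈ ts, ¬(0 ≤ pvM lower t ∧ pvM lower t ≤ 60) := by
  induction ts with
  | nil => intro t ht; simp at ht
  | cons t ts ih =>
    intro u hu
    unfold pvMv at h
    split_ifs at h with hv
    rcases List.mem_cons.mp hu with hu | hu
    · subst hu; exact hv
    · exact ih h u hu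

lemma pv_mv_some (lower : String) (ts : List String) (M : Int) (h : pvMv lower ts = some M) :
    (∃ t ∈ ts, pvM lower t = M) ∧ 0 ≤ M ∧ M ≤ 60 ∧
      ∀ t ∈ ts, 0 ≤ pvM lower t → pvM lower t ≤ 60 → M ≤ pvM lower t := by
  induction ts generalizing M with
  | nil => simp [pvMv] at h
  | cons t ts ih =>
    unfold pvMv at h
    split_ifs at h with hv
    · rcases hmv : pvMv lower ts with _ | M'
      · rw [hmv] at h
        simp only [Option.some.injEq] at h
        refine ⟨⟨t, by simp, by omega⟩, by omega, by omega, ?_⟩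
        intro u hu h0 h60
        rcases List.mem_cons.mp hu with hu | hu
        · subst hu; omega
        · exact absurd (And.intro h0 h60) (pv_mv_none lower ts hmv u hu)
      · rw [hmv] at h
        simp only [Option.some.injEq] at h
        obtain ⟨⟨u0, hu0, hu0M⟩, h0', h60', hmin⟩ := ih M' hmv
        by_cases hc : pvM lower t ≤ M'
        · refine ⟨⟨t, by simp, by omega⟩, by omega, by omega, ?_⟩
          intro u hu g0 g60
          rcases List.mem_cons.mp hu with hu | hu
          · subst hu; omega
          · have := hmin u hu g0 g60; omega
        · refine ⟨⟨u0, by simp [hu0], by omega⟩, by omega, by omega, ?_⟩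
          intro u hu g0 g60
          rcases List.mem_cons.mp hu with hu | hu
          · subst hu; omega
          · have := hmin u hu g0 g60; omega
    · obtain ⟨⟨u0, hu0, hu0M⟩, h0', h60', hmin⟩ := ih M h
      refine ⟨⟨u0, by simp [hu0], hu0M⟩, h0', h60', ?_⟩
      intro u hu g0 g60
      rcases List.mem_cons.mp hu with hu | hu
      · subst hu; exact absurd (And.intro g0 g60) hv
      · exact hmin u hu g0 g60

lemma pv_foldA_some (lower : String) (ts : List String) : ∀ (b : Int) (tb : String),
    List.foldl (pvStepA lower) (some b, some tb) ts =
      match pvMv lower ts with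
      | none => (some b, some tb)
      | some M => if M < b then (some M, ts.find? (fun t => pvM lower t == M))
                  else (some b, some tb) := by
  induction ts with
  | nil => intro b tb; simp [pvMv]
  | cons t ts ih =>
    intro b tb
    rw [List.foldl_cons]
    have hm1 : -1 ≤ pvM lower t := PySem.Chars.neg_one_le_find _ _
    by_cases hv : 0 ≤ pvM lower t ∧ pvM lower t ≤ 60
    · rw [pv_stepA_valid_some lower t b _ hv.1 hv.2]
      by_cases hlt : pvM lower t < b
      · rw [if_pos hlt, ih]
        rcases hmv : pvMv lower ts with _ | M
        · simp only [pvMv, if_pos hv, hmv]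
          rw [if_pos hlt, List.find?_cons_of_pos (by simp)]
        · have hM := pv_mv_some lower ts M hmv
          simp only [pvMv, if_pos hv, hmv]
          by_cases hc : pvM lower t ≤ M
          · rw [min_eq_left hc, if_neg (by omega), if_pos (by omega)]
            rw [List.find?_cons_of_pos (by simp)]
          · rw [min_eq_right (by omega), if_pos (by omega), if_pos (by omega)]
            rw [List.find?_cons_of_neg (by simp; omega)]
      · rw [if_neg hlt, ih]
        rcases hmv : pvMv lower ts with _ | M
        · simp only [pvMv, if_pos hv, hmv]
          rw [if_neg (by omega)]
        · have hM := pv_mv_some lower ts M hmv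
          simp only [pvMv, if_pos hv, hmv]
          by_cases hc : pvM lower t ≤ M
          · rw [min_eq_left hc, if_neg hlt, if_neg (by omega)]
          · rw [min_eq_right (by omega)]
            by_cases hMb : M < b
            · rw [if_pos hMb, if_pos hMb]
              rw [List.find?_cons_of_neg (by simp; omega)]
            · rw [if_neg hMb, if_neg hMb]
    · have hcase : pvM lower t = -1 ∨ 60 < pvM lower t := by omega
      rw [pv_stepA_invalid lower t _ hcase, ih]
      rcases hmv : pvMv lower ts with _ | M
      · simp only [pvMv, if_neg hv, hmv]
      · have hM := pv_mv_some lower ts M hmv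
        simp only [pvMv, if_neg hv, hmv]
        obtain ⟨_, h0, h60, _⟩ := hM
        by_cases hMb : M < b
        · rw [if_pos hMb, if_pos hMb]
          rw [List.find?_cons_of_neg (by simp; omega)]
        · rw [if_neg hMb, if_neg hMb]

lemma pv_foldA_start (lower : String) (ts : List String) :
    List.foldl (pvStepA lower) ((none : Option Int), (none : Option String)) ts =
      match pvMv lower ts with
      | none => ((none : Option Int), (none : Option String))
      | some M => (some M, ts.find? (fun t => pvM lower t == M)) := by
  induction ts with
  | nil => simp [pvMv]
  | cons t ts ih =>
    rw [List.foldl_cons]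
    have hm1 : -1 ≤ pvM lower t := PySem.Chars.neg_one_le_find _ _
    by_cases hv : 0 ≤ pvM lower t ∧ pvM lower t ≤ 60
    · rw [pv_stepA_valid_none lower t _ hv.1 hv.2, pv_foldA_some]
      rcases hmv : pvMv lower ts with _ | M
      · simp only [pvMv, if_pos hv, hmv]
        rw [List.find?_cons_of_pos (by simp)]
      · have hM := pv_mv_some lower ts M hmv
        simp only [pvMv, if_pos hv, hmv]
        by_cases hc : pvM lower t ≤ M
        · rw [min_eq_left hc, if_neg (by omega)]
          rw [List.find?_cons_of_pos (by simp)]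
        · rw [min_eq_right (by omega), if_pos (by omega)]
          rw [List.find?_cons_of_neg (by simp; omega)]
    · have hcase : pvM lower t = -1 ∨ 60 < pvM lower t := by omega
      rw [pv_stepA_invalid lower t _ hcase, ih]
      rcases hmv : pvMv lower ts with _ | M
      · simp only [pvMv, if_neg hv, hmv]
      · have hM := pv_mv_some lower ts M hmv
        obtain ⟨_, h0, h60, _⟩ := hM
        simp only [pvMv, if_neg hv, hmv]
        rw [List.find?_cons_of_neg (by simp; omega)]

lemma pv_occ_find_le (cs : List Char) (t : String) (p : Nat)
    (h : t.toList <+: cs.drop p) :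
    0 ≤ PySem.Chars.find cs t.toList ∧ PySem.Chars.find cs t.toList ≤ (p : Int) := by
  have hinf : t.toList <:+: cs := h.isInfix.trans (List.drop_suffix p cs).isInfix
  have h0 : 0 ≤ PySem.Chars.find cs t.toList := (PySem.Chars.find_nonneg_iff cs t.toList).mpr hinf
  refine ⟨h0, ?_⟩
  by_contra hgt
  have hp : p < (PySem.Chars.find cs t.toList).toNat := by omega
  exact (PySem.Chars.find_spec h0).2 p hp h

lemma pv_find_occ (cs : List Char) (t : String)
    (h : 0 ≤ PySem.Chars.find cs t.toList) :
    t.toList <+: cs.drop (PySem.Chars.find cs t.toList).toNat := by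
  exact (PySem.Chars.find_spec h).1

lemma pv_scan_none (cs : List Char) (n : Nat) : ∀ (pos : Nat),
    (∀ p, pos ≤ p → p ≤ n →
        pvTriggers.find? (fun trig => PySem.Chars.startswith (cs.drop p) trig.toList) = none) →
    pvScan cs n pos = (none, none) := by
  intro pos
  induction pos using pvScan.induct cs n with
  | case1 x hx trig hfind =>
    intro h
    rw [h x le_rfl hx] at hfind
    exact absurd hfind (by simp)
  | case2 x hx hfind ih =>
    intro h
    rw [pvScan]
    simp only [hx, dif_pos, hfind]
    exact ih (fun p hp hpn => h p (by omega) hpn)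
  | case3 x hx =>
    intro _
    rw [pvScan]
    simp [hx]

lemma pv_scan_found (cs : List Char) (n : Nat) : ∀ (pos q : Nat) (tr : String),
    pos ≤ q → q ≤ n →
    pvTriggers.find? (fun trig => PySem.Chars.startswith (cs.drop q) trig.toList) = some tr →
    (∀ p, pos ≤ p → p < q →
        pvTriggers.find? (fun trig => PySem.Chars.startswith (cs.drop p) trig.toList) = none) →
    pvScan cs n pos = (some (q : Int), some tr) := by
  intro pos q tr
  induction pos using pvScan.induct cs n with
  | case1 x hx trig hfind =>
    intro hxq hqn hq hnone
    rcases Nat.lt_or_ge x q with hlt | hge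
    · rw [hnone x le_rfl hlt] at hfind
      exact absurd hfind (by simp)
    · have hxq' : x = q := by omega
      subst hxq'
      rw [hq] at hfind
      rw [pvScan]
      simp [hx, hq]
  | case2 x hx hfind ih =>
    intro hxq hqn hq hnone
    have hlt : x < q := by
      rcases Nat.lt_or_ge x q with hlt | hge
      · exact hlt
      · have : x = q := by omega
        subst this
        rw [hq] at hfind; exact absurd hfind (by simp)
    rw [pvScan]
    simp only [hx, dif_pos, hfind]
    exact ih (by omega) hqn hq (fun p hp hpq => hnone p (by omega) hpq)
  | case3 x hx =>
    intro hxq hqn _ _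
    omega

lemma pv_trig_ne : ∀ t ∈ pvTriggers, t.toList ≠ [] := by decide

-- ===== VERDICT (by name: the statement is the Claim_ definition above) =====
lemma pv_find?_congr {α : Type} (l : List α) (p q : α → Bool)
    (h : ∀ x ∈ l, p x = q x) : l.find? p = l.find? q := by
  induction l with
  | nil => rfl
  | cons a l ih =>
    rw [List.find?_cons, List.find?_cons, h a (by simp)]
    split
    · rfl
    · exact ih (fun x hx => h x (by simp [hx]))

theorem find_trigger_spec : Claim_equal_find_trigger := by
  intro lower _
  unfold Spec_find_trigger find_trigger find_trigger_alt
  rw [pv_foldA_start]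
  have hbr : ∀ t : String, pvM lower t = PySem.Chars.find lower.toList t.toList := by
    intro t; simp [pvM]
  rcases hmv : pvMv lower pvTriggers with _ | M
  · rw [pv_scan_none]
    intro p hp hpn
    rw [List.find?_eq_none]
    intro t ht hsw
    have hocc : t.toList <+: lower.toList.drop p := (PySem.Chars.startswith_iff _ _).mp hsw
    obtain ⟨h0, hle⟩ := pv_occ_find_le lower.toList t p hocc
    have hp60 : (p : Int) ≤ 60 := by omega
    exact pv_mv_none lower pvTriggers hmv t ht
      ⟨by rw [hbr]; exact h0, by rw [hbr]; omega⟩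
  · obtain ⟨⟨t0, ht0, ht0M⟩, h0, h60, hmin⟩ := pv_mv_some lower pvTriggers M hmv
    have hf0 : 0 ≤ PySem.Chars.find lower.toList t0.toList := by rw [← hbr]; omega
    have hocc0 : t0.toList <+: lower.toList.drop M.toNat := by
      have := pv_find_occ lower.toList t0 hf0
      rw [← hbr, ht0M] at this
      exact this
    have hne : t0.toList ≠ [] := pv_trig_ne t0 ht0
    have hlen : M.toNat < lower.toList.length := by
      by_contra hc
      rw [List.drop_eq_nil_of_le (by omega)] at hocc0
      exact hne (List.prefix_nil.mp hocc0)
    have hqn : M.toNat ≤ min lower.toList.length 60 := by omega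
    have hpr : ∀ t ∈ pvTriggers,
        PySem.Chars.startswith (lower.toList.drop M.toNat) t.toList = (pvM lower t == M) := by
      intro t ht
      by_cases hocc : t.toList <+: lower.toList.drop M.toNat
      · obtain ⟨g0, gle⟩ := pv_occ_find_le lower.toList t M.toNat hocc
        rw [← hbr] at g0 gle
        have g60 : pvM lower t ≤ 60 := by omega
        have := hmin t ht g0 g60
        have heq : pvM lower t = M := by omega
        rw [(PySem.Chars.startswith_iff _ _).mpr hocc]
        simp [heq]
      · rw [Bool.eq_iff_iff]
        constructor
        · intro hsw; exact absurd ((PySem.Chars.startswith_iff _ _).mp hsw) hocc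
        · intro hbeq
          exfalso
          have heq : pvM lower t = M := by simpa using hbeq
          apply hocc
          have gf : 0 ≤ PySem.Chars.find lower.toList t.toList := by rw [← hbr]; omega
          have := pv_find_occ lower.toList t gf
          rw [← hbr, heq] at this
          exact this
    have hsome : (pvTriggers.find? (fun t => pvM lower t == M)).isSome := by
      rw [List.find?_isSome]
      exact ⟨t0, ht0, by simp [ht0M]⟩
    obtain ⟨tr, htr⟩ := Option.isSome_iff_exists.mp hsome
    rw [pv_scan_found lower.toList (min lower.toList.length 60) 0 M.toNat tr (by omega) hqn]
    · show (some M, pvTriggers.find? (fun t => pvM lower t == M)) = (some ((M.toNat : Int)), some tr)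
      rw [htr, Int.toNat_of_nonneg h0]
    · rw [pv_find?_congr _ _ _ hpr]
      exact htr
    · intro p hp hplt
      rw [List.find?_eq_none]
      intro t ht hsw
      have hocc : t.toList <+: lower.toList.drop p := (PySem.Chars.startswith_iff _ _).mp hsw
      obtain ⟨g0, gle⟩ := pv_occ_find_le lower.toList t p hocc
      rw [← hbr] at g0 gle
      have g60 : pvM lower t ≤ 60 := by omega
      have := hmin t ht g0 g60
      omega
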